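-- pv_equiv track=rewrite | github.com/gregSchwartz18/starter-python-bot | bot/event_handler.py | money
-- ===== SOURCE A (Python) =====
-- def money(x):
--     money = x
--     final = ''
--     check = False
--     step = 0
--     for x in money:
--         if check == True:
--             step += 1
--         if x == '.':
--             final += x
--             check = True
--         else:
--             final += x
--         if step == 2:
--             break
--     return final
-- ===== SOURCE B (Python) =====
-- def money(x):
--     i = x.find('.')
--     return x if i == -1 else x[:i + 3]
-- ===== Notes on version B (the rewrite author's own statement) =====
-- stated objective: simpler
-- what changed: Replaced the per-character copy loop with its check flag and step counter by a single substring find plus one slice x[:i+3].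
import Mathlib
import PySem

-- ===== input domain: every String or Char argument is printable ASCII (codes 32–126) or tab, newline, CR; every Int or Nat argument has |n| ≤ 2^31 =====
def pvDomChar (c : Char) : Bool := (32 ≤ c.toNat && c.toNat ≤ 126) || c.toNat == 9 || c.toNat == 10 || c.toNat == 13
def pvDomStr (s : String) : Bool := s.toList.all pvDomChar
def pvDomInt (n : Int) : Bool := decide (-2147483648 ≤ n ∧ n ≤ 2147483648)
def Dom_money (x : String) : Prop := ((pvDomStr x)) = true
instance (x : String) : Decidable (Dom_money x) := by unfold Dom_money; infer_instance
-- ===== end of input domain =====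

-- B replaces A's stateful per-character copy loop (check flag + step counter + break)
-- by one find('.') and one slice x[:i+3]; same O(n) cost, simpler.

-- ===== PORT A =====
-- the for-loop of A with its state (final, check, step) and its break (step == 2)
def moneyLoop (cs : List Char) (final : List Char) (check : Bool) (step : Nat) : List Char :=
  match cs with
  | [] => final
  | c :: rest =>
    let step' := if check then step + 1 else step
    let final' := final ++ [c]
    let check' := if c = '.' then true else check
    if step' = 2 then final' else moneyLoop rest final' check' step'

def money (x : String) : String := String.ofList (moneyLoop x.toList [] false 0)

-- ===== PORT B =====
def money_alt (x : String) : String :=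
  let i := PySem.Str.find x "."
  if i = -1 then x else PySem.Str.slice x none (some (i + 3))

-- ===== PRECONDITION & SPEC =====
def Spec_money (x : String) (out : String) : Prop := out = money_alt x
instance (x : String) (out : String) : Decidable (Spec_money x out) := by unfold Spec_money; infer_instance

-- ===== CLAIM (what is proved, stated in full; the proofs are below) =====
def Claim_equal_money : Prop := ∀ (x : String), Dom_money x → Spec_money x (money x)

-- ===== LEMMAS AND PROOFS =====

theorem moneyLoop_true_one (cs acc : List Char) :
    moneyLoop cs acc true 1 = acc ++ cs.take 1 := by
  cases cs <;> simp [moneyLoop]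

theorem moneyLoop_true_zero (cs acc : List Char) :
    moneyLoop cs acc true 0 = acc ++ cs.take 2 := by
  cases cs with
  | nil => simp [moneyLoop]
  | cons c rest => simp [moneyLoop, moneyLoop_true_one, List.take_succ_cons]

theorem moneyLoop_no_dot (cs : List Char) (acc : List Char) (h : '.' ∉ cs) :
    moneyLoop cs acc false 0 = acc ++ cs := by
  induction cs generalizing acc with
  | nil => simp [moneyLoop]
  | cons c rest ih =>
    have hc : c ≠ '.' := fun hc => h (hc ▸ List.mem_cons_self)
    simp [moneyLoop, hc, ih _ (fun hm => h (List.mem_cons_of_mem _ hm))]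

theorem moneyLoop_dot (pre post acc : List Char) (h : '.' ∉ pre) :
    moneyLoop (pre ++ '.' :: post) acc false 0 = acc ++ pre ++ '.' :: post.take 2 := by
  induction pre generalizing acc with
  | nil => simp [moneyLoop, moneyLoop_true_zero]
  | cons c pre ih =>
    have hc : c ≠ '.' := fun hc => h (hc ▸ List.mem_cons_self)
    simp [moneyLoop, hc, ih _ (fun hm => h (List.mem_cons_of_mem _ hm))]

-- ===== VERDICT (by name: the statement is the Claim_ definition above) =====
theorem money_spec : Claim_equal_money := by
  intro x _
  unfold Spec_money money money_alt
  have htl : PySem.Str.find x "." = PySem.Chars.find x.toList ['.'] := by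
    simp [PySem.Str.find_eq]
  rw [htl]
  by_cases h : '.' ∈ x.toList
  · -- a dot exists: find is nonnegative and points at the first one
    have hinf : ['.'] <:+: x.toList := by
      obtain ⟨l, r, hlr⟩ := List.append_of_mem h
      exact ⟨l, r, by simp [hlr]⟩
    have hne : PySem.Chars.find x.toList ['.'] ≠ -1 :=
      (PySem.Chars.find_ne_neg_one_iff _ _).mpr hinf
    have hnn : 0 ≤ PySem.Chars.find x.toList ['.'] := by
      have := PySem.Chars.neg_one_le_find x.toList ['.']
      omega
    set n : Nat := (PySem.Chars.find x.toList ['.']).toNat with hn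
    have hfind : PySem.Chars.find x.toList ['.'] = (n : Int) := by omega
    obtain ⟨hpre, hmin⟩ := PySem.Chars.find_spec (s := x.toList) (sub := ['.']) hnn
    obtain ⟨tail, htail0⟩ := hpre
    have htail : x.toList.drop n = '.' :: tail := by simpa using htail0.symm
    have hnlen : n < x.toList.length := by
      by_contra hge
      rw [List.drop_eq_nil_of_le (by omega)] at htail; cases htail
    have hsplit : x.toList = x.toList.take n ++ '.' :: tail := by
      conv_lhs => rw [← List.take_append_drop n x.toList]
      rw [htail]
    have hnotpre : '.' ∉ x.toList.take n := by
      intro hm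
      obtain ⟨i, hi, hget⟩ := List.getElem_of_mem hm
      have hilt : i < n := lt_of_lt_of_le hi (List.length_take_le _ _)
      have hilen : i < x.toList.length := lt_trans hilt hnlen
      apply hmin i (by exact_mod_cast hilt)
      refine ⟨x.toList.drop (i + 1), ?_⟩
      have hgi : x.toList[i]'hilen = '.' := by
        rw [← List.getElem_take (h := hi)]
        exact hget
      calc ['.'] ++ x.toList.drop (i + 1) = x.toList[i] :: x.toList.drop (i + 1) := by
            simp [hgi]
        _ = x.toList.drop i := List.getElem_cons_drop hilen
    rw [hfind, if_neg (by omega)]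
    apply String.toList_inj.mp
    rw [String.toList_ofList]
    conv_lhs => rw [hsplit]
    rw [moneyLoop_dot _ _ _ hnotpre]
    simp only [PySem.Str.toList_slice, PySem.Chars.slice_eq_listSlice]
    rw [PySem.List.slice_to x.toList (by omega)]
    have hb : ((n : Int) + 3).toNat = n + 3 := by omega
    rw [hb]
    conv_rhs => rw [hsplit]
    have hlen : (x.toList.take n).length = n := by
      rw [List.length_take]; omega
    calc x.toList.take n ++ '.' :: tail.take 2
        = x.toList.take n ++ ('.' :: tail).take 3 := by simp [List.take_succ_cons]
      _ = (x.toList.take n ++ '.' :: tail).take ((x.toList.take n).length + 3) :=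
          (List.take_length_add_append 3 (l₁ := x.toList.take n) (l₂ := '.' :: tail)).symm
      _ = (x.toList.take n ++ '.' :: tail).take (n + 3) := by rw [hlen]
  · -- no dot: A copies everything, B returns x unchanged
    have hfind : PySem.Chars.find x.toList ['.'] = -1 := by
      rw [PySem.Chars.find_eq_neg_one_iff]
      intro ⟨l, r, hlr⟩
      exact h (by rw [← hlr]; simp)
    rw [hfind, if_pos rfl, moneyLoop_no_dot _ _ h]
    apply String.toList_inj.mp
    simp
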